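-- pv_equiv track=rewrite | github.com/kasunvimu8/NDD | scripts/rq1/state_pair_analysis/fraggen_state_pair_analysis.py | compute_nd_analysis
-- ===== SOURCE A (Python) =====
-- def compute_nd_analysis(y_true, y_pred, nd_types):
--     """
--     - y_true: list of ground-truth labels (0=distinct, 1=near-duplicate)
--     - y_pred: list of predicted labels (0=distinct, 1=near-duplicate)
--     - nd_types: list of ND categories in {0=clone, 2=ND2, 3=ND3} for near-duplicate pairs
--     """
--     analysis_dict = {
--         'total_clones': 0, 'correctly_pred_clones': 0,
--         'total_nd2': 0, 'correctly_pred_nd2': 0,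
--         'total_nd3': 0, 'correctly_pred_nd3': 0,
--         'total_distinct': 0, 'correctly_pred_distinct': 0
--     }
--
--     for i in range(len(y_true)):
--         gt_label = y_true[i]  # 0 or 1
--         pred_label = y_pred[i]  # 0 or 1
--         nd_type_val = nd_types[i]  # 0,2,3
--
--         if gt_label == 0:
--             # Distinct
--             analysis_dict['total_distinct'] += 1
--             if pred_label == 0:
--                 analysis_dict['correctly_pred_distinct'] += 1
--         elif gt_label == 1:
--             # Near-duplicate
--             if nd_type_val == 0:
--                 # clone
--                 analysis_dict['total_clones'] += 1
--                 if pred_label == 1: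
--                     analysis_dict['correctly_pred_clones'] += 1
--             elif nd_type_val == 2:
--                 analysis_dict['total_nd2'] += 1
--                 if pred_label == 1:
--                     analysis_dict['correctly_pred_nd2'] += 1
--             elif nd_type_val == 3:
--                 analysis_dict['total_nd3'] += 1
--                 if pred_label == 1:
--                     analysis_dict['correctly_pred_nd3'] += 1
--
--     return analysis_dict
-- ===== SOURCE B (Python) =====
-- def compute_nd_analysis(y_true, y_pred, nd_types):
--     triples = list(zip(y_true, y_pred, nd_types))
--     return {
--         'total_clones': sum(1 for g, p, n in triples if g == 1 and n == 0),
--         'correctly_pred_clones': sum(1 for g, p, n in triples if g == 1 and n == 0 and p == 1),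
--         'total_nd2': sum(1 for g, p, n in triples if g == 1 and n == 2),
--         'correctly_pred_nd2': sum(1 for g, p, n in triples if g == 1 and n == 2 and p == 1),
--         'total_nd3': sum(1 for g, p, n in triples if g == 1 and n == 3),
--         'correctly_pred_nd3': sum(1 for g, p, n in triples if g == 1 and n == 3 and p == 1),
--         'total_distinct': sum(1 for g, p, n in triples if g == 0),
--         'correctly_pred_distinct': sum(1 for g, p, n in triples if g == 0 and p == 0),
--     }
-- ===== Notes on version B (the rewrite author's own statement) =====
-- stated objective: simpler
-- what changed: Replaces A's single sequential pass that mutates an 8-key dict through nested branches by eight independent count aggregations over the zipped (y_true, y_pred, nd_types) triples, building the result dict directly from the counts.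
import Mathlib
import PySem

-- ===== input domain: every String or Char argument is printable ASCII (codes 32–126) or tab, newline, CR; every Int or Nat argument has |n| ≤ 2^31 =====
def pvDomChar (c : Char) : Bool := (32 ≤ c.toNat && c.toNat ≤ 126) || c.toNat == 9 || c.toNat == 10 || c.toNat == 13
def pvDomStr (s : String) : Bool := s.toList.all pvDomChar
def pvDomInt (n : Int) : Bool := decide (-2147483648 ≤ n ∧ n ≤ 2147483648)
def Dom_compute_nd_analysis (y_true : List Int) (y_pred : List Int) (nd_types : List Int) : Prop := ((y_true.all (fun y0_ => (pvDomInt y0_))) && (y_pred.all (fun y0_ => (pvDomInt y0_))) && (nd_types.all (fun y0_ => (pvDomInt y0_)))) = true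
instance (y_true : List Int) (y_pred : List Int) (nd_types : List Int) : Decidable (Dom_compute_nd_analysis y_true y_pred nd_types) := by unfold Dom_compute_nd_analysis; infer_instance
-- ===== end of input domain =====

-- B replaces A's single branching pass over a mutable dict by eight independent
-- count aggregations over the zipped triples (objective: simpler).

-- ===== PORT A =====
-- loop body of A; each `analysis_dict['k'] += 1` is Dict.modify (exact: every key is present in the dict)
def pvStepA (d : PySem.Dict String Int) (gt pd nd : Int) : PySem.Dict String Int :=
  if gt == 0 then
    let d := d.modify "total_distinct" 0 (· + 1)
    if pd == 0 then d.modify "correctly_pred_distinct" 0 (· + 1) else d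
  else if gt == 1 then
    if nd == 0 then
      let d := d.modify "total_clones" 0 (· + 1)
      if pd == 1 then d.modify "correctly_pred_clones" 0 (· + 1) else d
    else if nd == 2 then
      let d := d.modify "total_nd2" 0 (· + 1)
      if pd == 1 then d.modify "correctly_pred_nd2" 0 (· + 1) else d
    else if nd == 3 then
      let d := d.modify "total_nd3" 0 (· + 1)
      if pd == 1 then d.modify "correctly_pred_nd3" 0 (· + 1) else d
    else d
  else d

def compute_nd_analysis (y_true : List Int) (y_pred : List Int) (nd_types : List Int) : List (String × Int) :=
  let init : PySem.Dict String Int := PySem.Dict.ofList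
    [("total_clones", 0), ("correctly_pred_clones", 0),
     ("total_nd2", 0), ("correctly_pred_nd2", 0),
     ("total_nd3", 0), ("correctly_pred_nd3", 0),
     ("total_distinct", 0), ("correctly_pred_distinct", 0)]
  ((PySem.List.pyRange 0 (y_true.length : Int) 1).foldl (fun d i =>
    let gt := PySem.List.pyGetD y_true i 0
    let pd := PySem.List.pyGetD y_pred i 0
    let nd := PySem.List.pyGetD nd_types i 0
    pvStepA d gt pd nd) init).items

-- ===== PORT B =====
def compute_nd_analysis_alt (y_true : List Int) (y_pred : List Int) (nd_types : List Int) : List (String × Int) :=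
  let ts := y_true.zip (y_pred.zip nd_types)
  [("total_clones", (ts.countP (fun t => t.1 == 1 && t.2.2 == 0) : Int)),
   ("correctly_pred_clones", (ts.countP (fun t => t.1 == 1 && t.2.2 == 0 && t.2.1 == 1) : Int)),
   ("total_nd2", (ts.countP (fun t => t.1 == 1 && t.2.2 == 2) : Int)),
   ("correctly_pred_nd2", (ts.countP (fun t => t.1 == 1 && t.2.2 == 2 && t.2.1 == 1) : Int)),
   ("total_nd3", (ts.countP (fun t => t.1 == 1 && t.2.2 == 3) : Int)),
   ("correctly_pred_nd3", (ts.countP (fun t => t.1 == 1 && t.2.2 == 3 && t.2.1 == 1) : Int)),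
   ("total_distinct", (ts.countP (fun t => t.1 == 0) : Int)),
   ("correctly_pred_distinct", (ts.countP (fun t => t.1 == 0 && t.2.1 == 0) : Int))]

-- ===== PRECONDITION & SPEC =====
-- A indexes y_pred and nd_types at every i < len(y_true); shorter lists raise IndexError.
def Pre_compute_nd_analysis (y_true : List Int) (y_pred : List Int) (nd_types : List Int) : Prop :=
  y_true.length ≤ y_pred.length ∧ y_true.length ≤ nd_types.length
instance (y_true : List Int) (y_pred : List Int) (nd_types : List Int) : Decidable (Pre_compute_nd_analysis y_true y_pred nd_types) := by unfold Pre_compute_nd_analysis; infer_instance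

def pvWitness_compute_nd_analysis : List Int × List Int × List Int := ([0, 1, 1, 1], [0, 1, 0, 1], [0, 0, 2, 3])

def Spec_compute_nd_analysis (y_true : List Int) (y_pred : List Int) (nd_types : List Int) (out : List (String × Int)) : Prop := out = compute_nd_analysis_alt y_true y_pred nd_types
instance (y_true : List Int) (y_pred : List Int) (nd_types : List Int) (out : List (String × Int)) : Decidable (Spec_compute_nd_analysis y_true y_pred nd_types out) := by unfold Spec_compute_nd_analysis; infer_instance

-- ===== CLAIM (what is proved, stated in full; the proofs are below) =====
def Claim_equal_compute_nd_analysis : Prop := ∀ (y_true : List Int) (y_pred : List Int) (nd_types : List Int), Dom_compute_nd_analysis y_true y_pred nd_types → Pre_compute_nd_analysis y_true y_pred nd_types → Spec_compute_nd_analysis y_true y_pred nd_types (compute_nd_analysis y_true y_pred nd_types)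

-- ===== LEMMAS AND PROOFS =====

-- the dict state of A's loop, with its eight counters made explicit
def pvMk (c1 c2 c3 c4 c5 c6 c7 c8 : Int) : PySem.Dict String Int :=
  PySem.Dict.mk
    [("total_clones", c1), ("correctly_pred_clones", c2),
     ("total_nd2", c3), ("correctly_pred_nd2", c4),
     ("total_nd3", c5), ("correctly_pred_nd3", c6),
     ("total_distinct", c7), ("correctly_pred_distinct", c8)]

lemma pvStepA_mk (c1 c2 c3 c4 c5 c6 c7 c8 gt pd nd : Int) :
    pvStepA (pvMk c1 c2 c3 c4 c5 c6 c7 c8) gt pd nd =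
    pvMk (c1 + (if gt == 1 && nd == 0 then 1 else 0))
         (c2 + (if gt == 1 && nd == 0 && pd == 1 then 1 else 0))
         (c3 + (if gt == 1 && nd == 2 then 1 else 0))
         (c4 + (if gt == 1 && nd == 2 && pd == 1 then 1 else 0))
         (c5 + (if gt == 1 && nd == 3 then 1 else 0))
         (c6 + (if gt == 1 && nd == 3 && pd == 1 then 1 else 0))
         (c7 + (if gt == 0 then 1 else 0))
         (c8 + (if gt == 0 && pd == 0 then 1 else 0)) := by
  by_cases h0 : gt = 0 <;> by_cases h1 : gt = 1 <;>
    by_cases hp0 : pd = 0 <;> by_cases hp1 : pd = 1 <;>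
    by_cases hn0 : nd = 0 <;> by_cases hn2 : nd = 2 <;> by_cases hn3 : nd = 3 <;>
    simp_all [pvStepA, pvMk, PySem.Dict.modify, PySem.Dict.insert, PySem.Dict.getD, PySem.Dict.get?, PySem.Dict.contains]

lemma pvFold_mk (ts : List (Int × Int × Int)) :
    ∀ (c1 c2 c3 c4 c5 c6 c7 c8 : Int),
    ts.foldl (fun d t => pvStepA d t.1 t.2.1 t.2.2) (pvMk c1 c2 c3 c4 c5 c6 c7 c8) =
    pvMk (c1 + (ts.countP (fun t => t.1 == 1 && t.2.2 == 0) : Int))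
         (c2 + (ts.countP (fun t => t.1 == 1 && t.2.2 == 0 && t.2.1 == 1) : Int))
         (c3 + (ts.countP (fun t => t.1 == 1 && t.2.2 == 2) : Int))
         (c4 + (ts.countP (fun t => t.1 == 1 && t.2.2 == 2 && t.2.1 == 1) : Int))
         (c5 + (ts.countP (fun t => t.1 == 1 && t.2.2 == 3) : Int))
         (c6 + (ts.countP (fun t => t.1 == 1 && t.2.2 == 3 && t.2.1 == 1) : Int))
         (c7 + (ts.countP (fun t => t.1 == 0) : Int))
         (c8 + (ts.countP (fun t => t.1 == 0 && t.2.1 == 0) : Int)) := by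
  induction ts with
  | nil => intro c1 c2 c3 c4 c5 c6 c7 c8; simp
  | cons t ts ih =>
      intro c1 c2 c3 c4 c5 c6 c7 c8
      simp only [List.foldl_cons, pvStepA_mk, ih, List.countP_cons]
      congr 1 <;> try (push_cast; split_ifs <;> omega)

-- an index loop reading three lists at the same index is the loop over the zipped triples
lemma pvFold_idx_eq_zip {α : Type} (f : α → Int → Int → Int → α)
    (yt yp nt : List Int) (init : α)
    (hp : yt.length ≤ yp.length) (hn : yt.length ≤ nt.length) :
    (PySem.List.pyRange 0 (yt.length : Int) 1).foldl
      (fun a i => f a (PySem.List.pyGetD yt i 0) (PySem.List.pyGetD yp i 0) (PySem.List.pyGetD nt i 0)) init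
    = (yt.zip (yp.zip nt)).foldl (fun a t => f a t.1 t.2.1 t.2.2) init := by
  have hlen : (yt.zip (yp.zip nt)).length = yt.length := by
    simp [List.length_zip]; omega
  suffices h : ∀ m : Nat, m ≤ yt.length →
      (PySem.List.pyRange 0 (m : Int) 1).foldl
        (fun a i => f a (PySem.List.pyGetD yt i 0) (PySem.List.pyGetD yp i 0) (PySem.List.pyGetD nt i 0)) init
      = ((yt.zip (yp.zip nt)).take m).foldl (fun a t => f a t.1 t.2.1 t.2.2) init by
    have h2 := h yt.length le_rfl
    rw [List.take_of_length_le (le_of_eq hlen)] at h2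
    exact h2
  intro m
  induction m with
  | zero => intro _; simp [PySem.List.pyRange_one_eq_nil]
  | succ k ih =>
      intro hk
      have hky : k < yt.length := by omega
      have hkz : k < (yt.zip (yp.zip nt)).length := by omega
      have hcast : ((k + 1 : Nat) : Int) = (k : Int) + 1 := by push_cast; ring
      rw [hcast, PySem.List.pyRange_one_succ_right (by positivity), List.foldl_append,
          ih (by omega), List.take_add_one, List.getElem?_eq_getElem hkz, List.foldl_append]
      have hgt : PySem.List.pyGetD yt (k : Int) 0 = yt[k] := by
        simp [PySem.List.pyGetD_natCast, List.getD_eq_getElem?_getD, List.getElem?_eq_getElem hky]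
      have hgp : PySem.List.pyGetD yp (k : Int) 0 = yp[k]'(by omega) := by
        simp [PySem.List.pyGetD_natCast, List.getD_eq_getElem?_getD,
              List.getElem?_eq_getElem (show k < yp.length by omega)]
      have hgn : PySem.List.pyGetD nt (k : Int) 0 = nt[k]'(by omega) := by
        simp [PySem.List.pyGetD_natCast, List.getD_eq_getElem?_getD,
              List.getElem?_eq_getElem (show k < nt.length by omega)]
      simp [hgt, hgp, hgn, List.getElem_zip]

-- ===== VERDICT (by name: the statement is the Claim_ definition above) =====
theorem compute_nd_analysis_spec : Claim_equal_compute_nd_analysis := by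
  intro yt yp nt _ hpre
  unfold Spec_compute_nd_analysis
  simp only [compute_nd_analysis, compute_nd_analysis_alt]
  rw [pvFold_idx_eq_zip (fun d gt pd nd => pvStepA d gt pd nd) yt yp nt _ hpre.1 hpre.2]
  have hinit : PySem.Dict.ofList
      [("total_clones", (0:Int)), ("correctly_pred_clones", 0),
       ("total_nd2", 0), ("correctly_pred_nd2", 0),
       ("total_nd3", 0), ("correctly_pred_nd3", 0),
       ("total_distinct", 0), ("correctly_pred_distinct", 0)] = pvMk 0 0 0 0 0 0 0 0 := by decide
  rw [hinit, pvFold_mk]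
  simp [pvMk]
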